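-- pv_equiv track=rewrite | github.com/pavansaipendry/Job-Book | utils/scorer.py | _dedupe_skills
-- ===== SOURCE A (Python) =====
-- from typing import Dict, List, Tuple, Optional
--
-- def _dedupe_skills(skills: List[str]) -> List[str]:
--     """Deduplicate skill aliases."""
--     alias_map = {
--         'react.js': 'react', 'reactjs': 'react',
--         'vue.js': 'vue', 'vuejs': 'vue',
--         'node.js': 'node', 'nodejs': 'node',
--         'express.js': 'express',
--         'next.js': 'nextjs',
--         'golang': 'go',
--         'postgresql': 'postgres', 'postgres': 'postgres',
--         'amazon web services': 'aws',
--         'google cloud': 'gcp',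
--         'tailwindcss': 'tailwind',
--         'scikit-learn': 'sklearn',
--         'springboot': 'spring boot',
--         'huggingface': 'hugging face',
--         'k8s': 'kubernetes',
--         'ci cd': 'ci/cd',
--     }
--     seen = set()
--     result = []
--     for s in skills:
--         canonical = alias_map.get(s, s)
--         if canonical not in seen:
--             seen.add(canonical)
--             result.append(canonical)
--     return sorted(result)
-- ===== SOURCE B (Python) =====
-- def _dedupe_skills(skills):
--     """Deduplicate skill aliases."""
--     alias_map = {
--         'react.js': 'react', 'reactjs': 'react',
--         'vue.js': 'vue', 'vuejs': 'vue',
--         'node.js': 'node', 'nodejs': 'node',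
--         'express.js': 'express',
--         'next.js': 'nextjs',
--         'golang': 'go',
--         'postgresql': 'postgres', 'postgres': 'postgres',
--         'amazon web services': 'aws',
--         'google cloud': 'gcp',
--         'tailwindcss': 'tailwind',
--         'scikit-learn': 'sklearn',
--         'springboot': 'spring boot',
--         'huggingface': 'hugging face',
--         'k8s': 'kubernetes',
--         'ci cd': 'ci/cd',
--     }
--     ordered = sorted(alias_map.get(s, s) for s in skills)
--     result = []
--     for s in ordered:
--         if not result or s != result[-1]:
--             result.append(s)
--     return result
-- ===== Notes on version B (the rewrite author's own statement) =====
-- stated objective: alternative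
-- what changed: B maps every skill to its canonical name keeping duplicates, sorts the full list, and removes adjacent duplicates in one pass, instead of A's seen-set dedup in input order followed by sorting.
import Mathlib
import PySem

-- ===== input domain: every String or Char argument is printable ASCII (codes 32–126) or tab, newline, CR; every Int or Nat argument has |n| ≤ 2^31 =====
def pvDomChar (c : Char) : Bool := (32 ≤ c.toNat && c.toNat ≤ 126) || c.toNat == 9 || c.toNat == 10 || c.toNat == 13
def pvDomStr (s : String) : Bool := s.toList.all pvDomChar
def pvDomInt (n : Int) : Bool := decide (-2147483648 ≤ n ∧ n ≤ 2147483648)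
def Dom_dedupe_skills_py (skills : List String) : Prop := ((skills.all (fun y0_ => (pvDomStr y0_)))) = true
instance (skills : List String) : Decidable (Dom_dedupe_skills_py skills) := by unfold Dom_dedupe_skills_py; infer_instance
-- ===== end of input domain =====

-- B maps skills through the alias table keeping duplicates, sorts the full list, then drops
-- adjacent duplicates in one pass, instead of A's seen-set dedup followed by sorting (alternative decomposition).


-- the alias_map literal, shared verbatim by both Pythons
def pvAliasMap : PySem.Dict String String := PySem.Dict.ofList [
  ("react.js", "react"), ("reactjs", "react"),
  ("vue.js", "vue"), ("vuejs", "vue"),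
  ("node.js", "node"), ("nodejs", "node"),
  ("express.js", "express"),
  ("next.js", "nextjs"),
  ("golang", "go"),
  ("postgresql", "postgres"), ("postgres", "postgres"),
  ("amazon web services", "aws"),
  ("google cloud", "gcp"),
  ("tailwindcss", "tailwind"),
  ("scikit-learn", "sklearn"),
  ("springboot", "spring boot"),
  ("huggingface", "hugging face"),
  ("k8s", "kubernetes"),
  ("ci cd", "ci/cd")]

-- ===== PORT A =====
-- for s in skills: canonical = alias_map.get(s, s); if canonical not in seen: seen.add(...); result.append(...)
def dedupe_skills_py (skills : List String) : List String :=
  let st := skills.foldl (fun (st : PySem.Set String × List String) s =>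
    let canonical := PySem.Dict.getD pvAliasMap s s
    if PySem.Set.contains st.1 canonical then st
    else (PySem.Set.add st.1 canonical, st.2 ++ [canonical])) (PySem.Set.empty, [])
  PySem.List.sorted st.2 (fun x => x) false

-- ===== PORT B =====
-- ordered = sorted(alias_map.get(s, s) for s in skills); then one pass appending s unless s == result[-1]
def dedupe_skills_py_alt (skills : List String) : List String :=
  let ordered := PySem.List.sorted (skills.map (fun s => PySem.Dict.getD pvAliasMap s s)) (fun x => x) false
  ordered.foldl (fun result s =>
    if result = [] ∨ PySem.List.pyGetD result (-1) "" ≠ s then result ++ [s] else result) []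

-- ===== PRECONDITION & SPEC =====
def Spec_dedupe_skills_py (skills : List String) (out : List String) : Prop := out = dedupe_skills_py_alt skills
instance (skills : List String) (out : List String) : Decidable (Spec_dedupe_skills_py skills out) := by unfold Spec_dedupe_skills_py; infer_instance

-- ===== CLAIM (what is proved, stated in full; the proofs are below) =====
def Claim_equal_dedupe_skills_py : Prop := ∀ (skills : List String), Dom_dedupe_skills_py skills → Spec_dedupe_skills_py skills (dedupe_skills_py skills)

-- ===== LEMMAS AND PROOFS =====

-- the shared canonicalisation
def pvCanon (s : String) : String := PySem.Dict.getD pvAliasMap s s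

-- structural form of B's adjacent-dedupe loop: previous kept element as an Option
def pvAdj : Option String → List String → List String
  | _, [] => []
  | p, y :: ys => if p = some y then pvAdj p ys else y :: pvAdj (some y) ys

theorem pvAdj_cons_eq {p : Option String} {y : String} {ys : List String} (h : p = some y) :
    pvAdj p (y :: ys) = pvAdj p ys := by simp [pvAdj, h]

theorem pvAdj_cons_ne {p : Option String} {y : String} {ys : List String} (h : p ≠ some y) :
    pvAdj p (y :: ys) = y :: pvAdj (some y) ys := by simp [pvAdj, h]

-- B's loop test "not result or s != result[-1]" decides exactly "getLast? ≠ some s"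
theorem pvCond_iff (acc : List String) (s : String) :
    (acc = [] ∨ PySem.List.pyGetD acc (-1) "" ≠ s) ↔ acc.getLast? ≠ some s := by
  induction acc using List.reverseRecOn with
  | nil => simp
  | append_singleton l a _ =>
    simp

theorem pvFoldl_eq_adj (ys : List String) : ∀ (acc : List String),
    ys.foldl (fun result s =>
      if result = [] ∨ PySem.List.pyGetD result (-1) "" ≠ s then result ++ [s] else result) acc
    = acc ++ pvAdj acc.getLast? ys := by
  induction ys with
  | nil => intro acc; simp [pvAdj]
  | cons y t ih =>
    intro acc
    rw [List.foldl_cons]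
    by_cases h : acc.getLast? = some y
    · rw [if_neg (by rw [pvCond_iff]; simp [h]), ih acc, pvAdj_cons_eq h]
    · rw [if_pos ((pvCond_iff acc y).mpr h), ih (acc ++ [y]), pvAdj_cons_ne h]
      simp

theorem pvAdj_chain (ys : List String) : ∀ (p : String), ys.Pairwise (· ≤ ·) →
    (∀ y ∈ ys, p ≤ y) →
    (pvAdj (some p) ys).Pairwise (· < ·) ∧ ∀ z ∈ pvAdj (some p) ys, p < z := by
  induction ys with
  | nil => intro p _ _; simp [pvAdj]
  | cons y t ih =>
    intro p h hp
    have hy : p ≤ y := hp y (by simp)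
    have ht : t.Pairwise (· ≤ ·) := h.tail
    have hyt : ∀ z ∈ t, y ≤ z := fun z hz => List.rel_of_pairwise_cons h hz
    by_cases hpy : p = y
    · subst hpy
      rw [pvAdj_cons_eq rfl]
      exact ih p ht hyt
    · have hplt : p < y := lt_of_le_of_ne hy hpy
      obtain ⟨ih1, ih2⟩ := ih y ht hyt
      rw [pvAdj_cons_ne (by simpa using hpy)]
      refine ⟨List.Pairwise.cons ih2 ih1, ?_⟩
      intro z hz
      rcases List.mem_cons.mp hz with rfl | hz
      · exact hplt
      · exact lt_trans hplt (ih2 z hz)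

theorem pvAdj_mem (ys : List String) : ∀ (p z : String), ys.Pairwise (· ≤ ·) →
    (∀ y ∈ ys, p ≤ y) →
    (z ∈ pvAdj (some p) ys ↔ z ∈ ys ∧ z ≠ p) := by
  induction ys with
  | nil => intro p z _ _; simp [pvAdj]
  | cons y t ih =>
    intro p z h hp
    have hy : p ≤ y := hp y (by simp)
    have ht : t.Pairwise (· ≤ ·) := h.tail
    have hyt : ∀ w ∈ t, y ≤ w := fun w hw => List.rel_of_pairwise_cons h hw
    by_cases hpy : p = y
    · subst hpy
      rw [pvAdj_cons_eq rfl, ih p z ht hyt]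
      constructor
      · rintro ⟨hz, hzp⟩; exact ⟨List.mem_cons_of_mem _ hz, hzp⟩
      · rintro ⟨hz, hzp⟩
        rcases List.mem_cons.mp hz with rfl | hz
        · exact absurd rfl hzp
        · exact ⟨hz, hzp⟩
    · have hplt : p < y := lt_of_le_of_ne hy hpy
      rw [pvAdj_cons_ne (by simpa using hpy), List.mem_cons, ih y z ht hyt]
      constructor
      · rintro (rfl | ⟨hz, hzy⟩)
        · exact ⟨by simp, ne_of_gt hplt⟩
        · exact ⟨List.mem_cons_of_mem _ hz, ne_of_gt (lt_of_lt_of_le hplt (hyt z hz))⟩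
      · rintro ⟨hz, hzp⟩
        rcases List.mem_cons.mp hz with rfl | hz
        · exact Or.inl rfl
        · by_cases hzy : z = y
          · exact Or.inl hzy
          · exact Or.inr ⟨hz, hzy⟩

theorem pvAdj_none_pairwise (ys : List String) (h : ys.Pairwise (· ≤ ·)) :
    (pvAdj none ys).Pairwise (· < ·) := by
  cases ys with
  | nil => simp [pvAdj]
  | cons y t =>
    rw [pvAdj_cons_ne (by simp)]
    have hyt : ∀ z ∈ t, y ≤ z := fun z hz => List.rel_of_pairwise_cons h hz
    obtain ⟨h1, h2⟩ := pvAdj_chain t y h.tail hyt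
    exact List.Pairwise.cons h2 h1

theorem pvAdj_none_mem (ys : List String) (h : ys.Pairwise (· ≤ ·)) (z : String) :
    z ∈ pvAdj none ys ↔ z ∈ ys := by
  cases ys with
  | nil => simp [pvAdj]
  | cons y t =>
    rw [pvAdj_cons_ne (by simp)]
    have hyt : ∀ w ∈ t, y ≤ w := fun w hw => List.rel_of_pairwise_cons h hw
    rw [List.mem_cons, pvAdj_mem t y z h.tail hyt, List.mem_cons]
    constructor
    · rintro (rfl | ⟨hz, _⟩)
      · exact Or.inl rfl
      · exact Or.inr hz
    · rintro (rfl | hz)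
      · exact Or.inl rfl
      · by_cases hzy : z = y
        · exact Or.inl hzy
        · exact Or.inr ⟨hz, hzy⟩

-- A's loop keeps seen and result equal as lists; both are foldl Set.add
theorem pvA_fold (l : List String) : ∀ (t : PySem.Set String),
    l.foldl (fun (st : PySem.Set String × List String) s =>
      if PySem.Set.contains st.1 (PySem.Dict.getD pvAliasMap s s) = true then st
      else (PySem.Set.add st.1 (PySem.Dict.getD pvAliasMap s s), st.2 ++ [PySem.Dict.getD pvAliasMap s s]))
      (t, t)
    = (l.foldl (fun t s => PySem.Set.add t (pvCanon s)) t,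
       l.foldl (fun t s => PySem.Set.add t (pvCanon s)) t) := by
  induction l with
  | nil => intro t; rfl
  | cons x l ih =>
    intro t
    have harg : (if PySem.Set.contains (t, t).1 (PySem.Dict.getD pvAliasMap x x) = true
          then ((t, t) : PySem.Set String × List String)
          else (PySem.Set.add (t, t).1 (PySem.Dict.getD pvAliasMap x x),
                (t, t).2 ++ [PySem.Dict.getD pvAliasMap x x]))
        = (PySem.Set.add t (pvCanon x), PySem.Set.add t (pvCanon x)) := by
      by_cases h : PySem.Dict.getD pvAliasMap x x ∈ t
      · simp [pvCanon, PySem.Set.add, PySem.Set.contains, h]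
      · simp [pvCanon, PySem.Set.add, PySem.Set.contains, h]
    simp only [List.foldl_cons]
    rw [harg]
    exact ih (PySem.Set.add t (pvCanon x))

-- ===== VERDICT (by name: the statement is the Claim_ definition above) =====
theorem dedupe_skills_py_spec : Claim_equal_dedupe_skills_py := by
  intro skills _
  unfold Spec_dedupe_skills_py dedupe_skills_py dedupe_skills_py_alt
  simp only []
  rw [show ((PySem.Set.empty : PySem.Set String), ([] : List String))
        = ((([] : List String) : PySem.Set String), ([] : List String)) from rfl]
  rw [pvA_fold skills []]
  set mapped := skills.map (fun s => PySem.Dict.getD pvAliasMap s s) with hmapped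
  have hfold : skills.foldl (fun t s => PySem.Set.add t (pvCanon s)) ([] : PySem.Set String)
      = PySem.Set.ofList mapped := by
    rw [← PySem.Set.update_map_eq_foldl_add skills pvCanon ([] : PySem.Set String),
        PySem.Set.update_nil_left]
    rfl
  rw [hfold]
  set ys := PySem.List.sorted mapped (fun x => x) false with hys
  rw [pvFoldl_eq_adj ys []]
  simp only [List.nil_append, List.getLast?_nil]
  have hpw : ys.Pairwise (· ≤ ·) := PySem.List.sorted_pairwise mapped (fun x => x)
  apply PySem.List.sorted_eq_of_perm_of_pairwise_lt
  · rw [List.perm_ext_iff_of_nodup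
      ((pvAdj_none_pairwise ys hpw).imp (fun h => ne_of_lt h))
      (PySem.Set.nodup_ofList mapped)]
    intro a
    rw [pvAdj_none_mem ys hpw a, PySem.Set.mem_ofList]
    exact PySem.List.mem_sorted mapped (fun x => x) false a
  · exact pvAdj_none_pairwise ys hpw
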